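-- pv_equiv track=rewrite | github.com/cnueinu/src | heuristics.py | get_min_key
-- ===== SOURCE A (Python) =====
-- def get_min_key(dic, k=1):
--     for i in range(k):
--         min_key = ""
--         min_value = 9999999
--         for key in dic:
--             if min_value > dic[key]:
--                 min_value = dic[key]
--                 min_key = key
--         dic[min_key] = 9999999
--     return min_key
-- ===== SOURCE B (Python) =====
-- def get_min_key(dic, k=1):
--     candidates = sorted([item for item in dic.items() if item[1] < 9999999],
--                         key=lambda item: item[1])
--     return candidates[k - 1][0] if 1 <= k <= len(candidates) else ""
-- ===== Notes on version B (the rewrite author's own statement) =====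
-- stated objective: faster
-- what changed: A runs k selection passes over the dict, each scanning all keys and knocking the winner out by overwriting its value with the 9999999 sentinel; B sorts the sub-9999999 items once (stably, by value) and indexes the k-th entry, returning '' when fewer than k candidates exist; equivalence is about the return value only (A mutates the dict, B does not).
import Mathlib
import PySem

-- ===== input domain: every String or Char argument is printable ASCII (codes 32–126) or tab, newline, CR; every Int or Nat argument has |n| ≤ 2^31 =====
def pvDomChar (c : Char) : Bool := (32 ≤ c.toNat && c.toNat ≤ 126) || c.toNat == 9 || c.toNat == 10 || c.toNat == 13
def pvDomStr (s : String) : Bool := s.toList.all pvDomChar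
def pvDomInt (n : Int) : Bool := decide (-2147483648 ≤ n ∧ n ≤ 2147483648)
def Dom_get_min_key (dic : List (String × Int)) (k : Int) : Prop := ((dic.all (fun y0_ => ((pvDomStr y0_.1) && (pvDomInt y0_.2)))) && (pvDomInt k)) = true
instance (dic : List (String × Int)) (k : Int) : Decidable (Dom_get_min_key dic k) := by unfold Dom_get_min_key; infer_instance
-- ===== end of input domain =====

-- B replaces A's k selection passes (each a full scan, knocking the winner out with the
-- 9999999 sentinel) by one stable sort of the sub-sentinel items by value and an index;
-- equivalence is about the return value only (Python A mutates its dict argument, B does not).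

-- ===== PORT A =====
-- Python receives `dic` as a dict: duplicate keys collapse exactly as dict construction
-- does (overwrite keeps position, new keys append); both ports model that conversion here.
def pvDictOf (dic : List (String × Int)) : PySem.Dict String Int :=
  dic.foldl (fun d p => d.insert p.1 p.2) PySem.Dict.empty

-- inner `for key in dic` scan carrying (min_value, min_key); dic[key] is getD (every
-- scanned key is present in the dict, so the default is never used — exact here)
def pvScanA (d : PySem.Dict String Int) : Int × String :=
  d.keys.foldl (fun acc key => if acc.1 > d.getD key 0 then (d.getD key 0, key) else acc)
    (9999999, "")

-- one iteration of A's outer loop: pick min_key, then dic[min_key] = 9999999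
def pvStepA (st : PySem.Dict String Int × String) : PySem.Dict String Int × String :=
  ((st.1.insert (pvScanA st.1).2 9999999), (pvScanA st.1).2)

-- for k < 1 Python's loop body never runs and min_key is unbound (UnboundLocalError):
-- Pre_ excludes that, so the initial "" below is never the returned value under Pre_.
def get_min_key (dic : List (String × Int)) (k : Int) : String :=
  ((PySem.List.pyRange 0 k 1).foldl (fun st _ => pvStepA st) (pvDictOf dic, "")).2

-- ===== PORT B =====
def get_min_key_alt (dic : List (String × Int)) (k : Int) : String :=
  let candidates :=
    PySem.List.sorted ((pvDictOf dic).items.filter (fun item => item.2 < 9999999))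
      (fun item => item.2) false
  if 1 ≤ k ∧ k ≤ (candidates.length : Int) then
    (PySem.List.pyGetD candidates (k - 1) ("", 0)).1
  else ""

-- ===== PRECONDITION & SPEC =====
-- Pre_ excludes exactly k < 1, where Python A raises UnboundLocalError (min_key unbound).
def Pre_get_min_key (dic : List (String × Int)) (k : Int) : Prop := 1 ≤ k
instance (dic : List (String × Int)) (k : Int) : Decidable (Pre_get_min_key dic k) := by unfold Pre_get_min_key; infer_instance
def pvWitness_get_min_key : (List (String × Int)) × Int := ([("a", 1)], 1)

def Spec_get_min_key (dic : List (String × Int)) (k : Int) (out : String) : Prop := out = get_min_key_alt dic k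
instance (dic : List (String × Int)) (k : Int) (out : String) : Decidable (Spec_get_min_key dic k out) := by unfold Spec_get_min_key; infer_instance

-- ===== CLAIM (what is proved, stated in full; the proofs are below) =====
def Claim_equal_get_min_key : Prop := ∀ (dic : List (String × Int)) (k : Int), Dom_get_min_key dic k → Pre_get_min_key dic k → Spec_get_min_key dic k (get_min_key dic k)

-- ===== LEMMAS AND PROOFS =====

-- the candidate items: those still selectable by A's strict `min_value > dic[key]` test
def pvCand (d : PySem.Dict String Int) : List (String × Int) :=
  d.items.filter (fun item => item.2 < 9999999)

-- A's inner-scan accumulator step, rephrased over items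
def pvStep2 (acc : Int × String) (p : String × Int) : Int × String :=
  if acc.1 > p.2 then (p.2, p.1) else acc

lemma insertBy_of_forall_before {α : Type} (before : α → α → Bool) (x : α) (ys : List α)
    (h : ∀ y ∈ ys, before x y = true) :
    PySem.List.insertBy before x ys = x :: ys := by
  cases ys with
  | nil => rfl
  | cons y t => simp [PySem.List.insertBy, h y (List.mem_cons_self ..)]

-- stable selection: if m is the first minimal element, sorting puts it first and the
-- rest is the sort of the list with m removed
lemma sel (u v : List (String × Int)) (m : String × Int)
    (hu : ∀ y ∈ u, m.2 < y.2) (hv : ∀ y ∈ v, m.2 ≤ y.2) :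
    PySem.List.sorted (u ++ m :: v) (fun it => it.2) false
      = m :: PySem.List.sorted (u ++ v) (fun it => it.2) false := by
  have key : ∀ acc : List (String × Int),
      (∀ y ∈ acc, m.2 ≤ y.2) →
      List.foldl (fun acc x =>
          PySem.List.insertBy (fun a b : String × Int => decide (a.2 < b.2)) x acc)
        (m :: acc) v
      = m :: List.foldl (fun acc x =>
          PySem.List.insertBy (fun a b : String × Int => decide (a.2 < b.2)) x acc)
        acc v := by
    induction v with
    | nil => intro acc _; rfl
    | cons y t ih =>
        intro acc hacc
        have hym : ¬ (y.2 < m.2) := not_lt.mpr (hv y (List.mem_cons_self ..))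
        have hins : PySem.List.insertBy (fun a b : String × Int => decide (a.2 < b.2)) y (m :: acc)
            = m :: PySem.List.insertBy (fun a b : String × Int => decide (a.2 < b.2)) y acc := by
          simp [PySem.List.insertBy, hym]
        have ht : ∀ z ∈ t, m.2 ≤ z.2 := fun z hz => hv z (List.mem_cons_of_mem _ hz)
        have hacc' : ∀ z ∈ PySem.List.insertBy (fun a b : String × Int => decide (a.2 < b.2)) y acc,
            m.2 ≤ z.2 := by
          intro z hz
          rcases (PySem.List.mem_insertBy _ _ _ _).1 hz with h | h
          · exact h ▸ hv y (List.mem_cons_self ..)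
          · exact hacc z h
        simpa [hins] using (ih (fun y hy => hv y (List.mem_cons_of_mem _ hy))
          (PySem.List.insertBy (fun a b : String × Int => decide (a.2 < b.2)) y acc) hacc')
  rw [PySem.List.sorted_eq_foldl_insertBy, PySem.List.sorted_eq_foldl_insertBy,
    List.foldl_append, List.foldl_append, List.foldl_cons]
  have hsortu : PySem.List.insertBy (fun a b : String × Int => decide (a.2 < b.2)) m
      (List.foldl (fun acc x =>
        PySem.List.insertBy (fun a b : String × Int => decide (a.2 < b.2)) x acc) [] u)
      = m :: List.foldl (fun acc x =>
        PySem.List.insertBy (fun a b : String × Int => decide (a.2 < b.2)) x acc) [] u := by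
    apply insertBy_of_forall_before
    intro y hy
    have : y ∈ PySem.List.sorted u (fun it : String × Int => it.2) false := by
      rw [PySem.List.sorted_eq_foldl_insertBy]; exact hy
    have : y ∈ u := (PySem.List.mem_sorted _ _ _ _).1 this
    simpa using hu y this
  rw [hsortu]
  apply key
  intro y hy
  have : y ∈ PySem.List.sorted u (fun it : String × Int => it.2) false := by
    rw [PySem.List.sorted_eq_foldl_insertBy]; exact hy
  exact le_of_lt (hu y ((PySem.List.mem_sorted _ _ _ _).1 this))

lemma scan_fixed (l : List (String × Int)) :
    ∀ acc : Int × String, (∀ p ∈ l, ¬ p.2 < acc.1) → l.foldl pvStep2 acc = acc := by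
  induction l with
  | nil => intro acc _; rfl
  | cons p t ih =>
      intro acc h
      have hp : ¬ acc.1 > p.2 := by
        have := h p (List.mem_cons_self ..); omega
      simp only [List.foldl_cons, pvStep2, if_neg hp]
      exact ih acc (fun q hq => h q (List.mem_cons_of_mem _ hq))

lemma scan_lower (U : List (String × Int)) (c : Int) :
    ∀ acc : Int × String, (∀ y ∈ U, c < y.2) → c < acc.1 → c < (U.foldl pvStep2 acc).1 := by
  induction U with
  | nil => intro acc _ h; exact h
  | cons y t ih =>
      intro acc hU hacc
      simp only [List.foldl_cons, pvStep2]
      split_ifs with h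
      · exact ih _ (fun z hz => hU z (List.mem_cons_of_mem _ hz)) (hU y (List.mem_cons_self ..))
      · exact ih _ (fun z hz => hU z (List.mem_cons_of_mem _ hz)) hacc

lemma scanA_eq_items (d : PySem.Dict String Int) (hnd : d.keys.Nodup) :
    pvScanA d = d.items.foldl pvStep2 (9999999, "") := by
  unfold pvScanA
  have hkeys : d.keys = d.items.map Prod.fst := rfl
  rw [hkeys, List.foldl_map]
  apply PySem.List.foldl_congr_mem
  intro acc p hp
  have hget : d.getD p.1 0 = p.2 :=
    PySem.Dict.getD_of_mem_items d (by simpa using hp) hnd 0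
  simp [pvStep2, hget]

-- decompose a list with at least one sub-sentinel value around its first minimal
-- sub-sentinel item m: strictly larger values before it, no smaller value after it
lemma decomp (l : List (String × Int)) (h : ∃ p ∈ l, p.2 < 9999999) :
    ∃ U m V, l = U ++ m :: V ∧ m.2 < 9999999 ∧ (∀ y ∈ U, m.2 < y.2) ∧ (∀ y ∈ V, m.2 ≤ y.2) := by
  induction l with
  | nil => simp at h
  | cons p t ih =>
      by_cases ht : ∃ q ∈ t, q.2 < 9999999
      · obtain ⟨U, m, V, hsplit, hm, hU, hV⟩ := ih ht
        by_cases hp : p.2 < 9999999 ∧ p.2 ≤ m.2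
        · refine ⟨[], p, t, by simp, hp.1, by simp, ?_⟩
          intro y hy
          rw [hsplit] at hy
          rcases List.mem_append.1 hy with hy | hy
          · exact le_of_lt (lt_of_le_of_lt hp.2 (hU y hy))
          · rcases List.mem_cons.1 hy with rfl | hy
            · exact hp.2
            · exact le_trans hp.2 (hV y hy)
        · refine ⟨p :: U, m, V, by rw [hsplit]; rfl, hm, ?_, hV⟩
          intro y hy
          rcases List.mem_cons.1 hy with rfl | hy
          · rcases not_and_or.1 hp with h1 | h1 <;> omega
          · exact hU y hy
      · obtain ⟨q, hq, hqv⟩ := h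
        have hqp : q = p := by
          rcases List.mem_cons.1 hq with rfl | hq
          · rfl
          · exact absurd ⟨q, hq, hqv⟩ ht
        subst hqp
        refine ⟨[], q, t, by simp, hqv, by simp, ?_⟩
        intro y hy
        have : ¬ y.2 < 9999999 := fun hc => ht ⟨y, hy, hc⟩
        omega

lemma filter_map_knock (x : String) (l : List (String × Int)) :
    (l.map (fun p => if p.1 == x then (x, (9999999 : Int)) else p)).filter
        (fun item => item.2 < 9999999)
      = (l.filter (fun item => item.2 < 9999999)).filter (fun p => !(p.1 == x)) := by
  induction l with
  | nil => rfl
  | cons p t ih =>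
      simp only [] at ih
      simp at ih
      by_cases hx : p.1 = x
      · by_cases hv : p.2 < 9999999 <;> simp [hx, hv, ih]
      · by_cases hv : p.2 < 9999999 <;> simp [hx, hv, ih]

lemma cand_insert (d : PySem.Dict String Int) (x : String) :
    pvCand (d.insert x 9999999) = (pvCand d).filter (fun p => !(p.1 == x)) := by
  unfold pvCand
  rw [PySem.Dict.items_insert]
  split_ifs with hc
  · exact filter_map_knock x d.items
  · have hnk : ∀ p ∈ d.items, p.1 ≠ x := by
      intro p hp hpx
      have h1 : p.1 ∈ d.items.map Prod.fst := List.mem_map_of_mem hp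
      rw [hpx] at h1
      have h2 : x ∈ d.keys := h1
      exact absurd ((PySem.Dict.contains_iff_mem_keys d x).2 h2) (by simp [hc])
    rw [List.filter_append]
    have h2 : (List.filter (fun item => decide (item.2 < 9999999)) [(x, (9999999 : Int))]) = [] := by
      simp
    rw [h2, List.append_nil]
    symm
    rw [List.filter_eq_self]
    intro p hp
    have := hnk p (List.mem_of_mem_filter hp)
    simpa using this

lemma key_unique {U V : List (String × Int)} {m : String × Int}
    (h : (List.map Prod.fst (U ++ m :: V)).Nodup) :
    ∀ y : String × Int, y ∈ U ∨ y ∈ V → y.1 ≠ m.1 := by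
  rw [List.map_append, List.map_cons] at h
  rcases List.nodup_append.1 h with ⟨_, h2, hdis⟩
  rcases List.nodup_cons.1 h2 with ⟨hm2, _⟩
  intro y hy hEq
  rcases hy with hy | hy
  · have : m.1 ∈ List.map Prod.fst U := by
      rw [← hEq]; exact List.mem_map_of_mem hy
    exact hdis m.1 this m.1 (List.mem_cons_self ..) rfl
  · exact hm2 (by rw [← hEq]; exact List.mem_map_of_mem hy)

-- the main invariant: after n+1 of A's passes over a nodup-key dict, the last picked
-- key is the (n+1)-th entry of the stable value-sort of the candidate items, or ""
lemma main_inv (n : Nat) : ∀ (d : PySem.Dict String Int), d.keys.Nodup → ∀ s : String,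
    (pvStepA^[n + 1] (d, s)).2 =
      if n < (PySem.List.sorted (pvCand d) (fun it => it.2) false).length
      then ((PySem.List.sorted (pvCand d) (fun it => it.2) false).getD n ("", 0)).1
      else "" := by
  induction n with
  | zero =>
      intro d hnd s
      by_cases hc : ∃ p ∈ d.items, p.2 < 9999999
      · obtain ⟨U, m, V, hsplit, hm, hU, hV⟩ := decomp d.items hc
        have hpick : (pvScanA d).2 = m.1 := by
          rw [scanA_eq_items d hnd, hsplit, List.foldl_append, List.foldl_cons]
          have h1 : m.2 < (U.foldl pvStep2 (9999999, "")).1 :=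
            scan_lower U m.2 (9999999, "") hU hm
          rw [show pvStep2 (U.foldl pvStep2 (9999999, "")) m = (m.2, m.1) by
            simp [pvStep2]; omega]
          rw [scan_fixed V (m.2, m.1) (fun p hp => not_lt.mpr (hV p hp))]
        have hcand : pvCand d
            = U.filter (fun it => it.2 < 9999999) ++ m :: V.filter (fun it => it.2 < 9999999) := by
          unfold pvCand; rw [hsplit]; simp [List.filter_append, hm]
        have hsel := sel (U.filter (fun it => it.2 < 9999999))
          (V.filter (fun it => it.2 < 9999999)) m
          (fun y hy => hU y (List.mem_of_mem_filter hy))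
          (fun y hy => hV y (List.mem_of_mem_filter hy))
        have hstep : (pvStepA (d, s)).2 = m.1 := by
          rw [show pvStepA (d, s)
              = ((d.insert (pvScanA d).2 9999999), (pvScanA d).2) from rfl, hpick]
        rw [Function.iterate_one, hstep, hcand, hsel]
        simp
      · have hcand : pvCand d = [] := by
          unfold pvCand
          rw [List.filter_eq_nil_iff]
          intro p hp
          simpa using fun hlt => hc ⟨p, hp, hlt⟩
        have hpick : (pvScanA d).2 = "" := by
          rw [scanA_eq_items d hnd,
            scan_fixed d.items (9999999, "") (fun p hp => fun hlt => hc ⟨p, hp, hlt⟩)]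
        simp [pvStepA, hpick, hcand, PySem.List.sorted]
  | succ n ih =>
      intro d hnd s
      rw [Function.iterate_succ_apply]
      by_cases hc : ∃ p ∈ d.items, p.2 < 9999999
      · obtain ⟨U, m, V, hsplit, hm, hU, hV⟩ := decomp d.items hc
        have hpick : (pvScanA d).2 = m.1 := by
          rw [scanA_eq_items d hnd, hsplit, List.foldl_append, List.foldl_cons]
          have h1 : m.2 < (U.foldl pvStep2 (9999999, "")).1 :=
            scan_lower U m.2 (9999999, "") hU hm
          rw [show pvStep2 (U.foldl pvStep2 (9999999, "")) m = (m.2, m.1) by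
            simp [pvStep2]; omega]
          rw [scan_fixed V (m.2, m.1) (fun p hp => not_lt.mpr (hV p hp))]
        have hcand : pvCand d
            = U.filter (fun it => it.2 < 9999999) ++ m :: V.filter (fun it => it.2 < 9999999) := by
          unfold pvCand; rw [hsplit]; simp [List.filter_append, hm]
        -- keys are nodup, so no other item shares m's key
        have hnodup : (List.map Prod.fst (U ++ m :: V)).Nodup := by
          rw [← hsplit]; exact hnd
        have hother := key_unique hnodup
        have hcand' : pvCand (d.insert m.1 9999999)
            = U.filter (fun it => it.2 < 9999999) ++ V.filter (fun it => it.2 < 9999999) := by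
          rw [cand_insert, hcand, List.filter_append, List.filter_cons]
          have hm1 : (!(m.1 == m.1)) = false := by simp
          rw [hm1]
          simp only [Bool.false_eq_true, if_false]
          congr 1
          · rw [List.filter_eq_self]
            intro p hp
            simpa using hother p (Or.inl (List.mem_of_mem_filter hp))
          · rw [List.filter_eq_self]
            intro p hp
            simpa using hother p (Or.inr (List.mem_of_mem_filter hp))
        have hsel := sel (U.filter (fun it => it.2 < 9999999))
          (V.filter (fun it => it.2 < 9999999)) m
          (fun y hy => hU y (List.mem_of_mem_filter hy))
          (fun y hy => hV y (List.mem_of_mem_filter hy))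
        have hstep : pvStepA (d, s) = (d.insert m.1 9999999, m.1) := by
          rw [show pvStepA (d, s)
              = ((d.insert (pvScanA d).2 9999999), (pvScanA d).2) from rfl, hpick]
        rw [hstep, ih (d.insert m.1 9999999) (PySem.Dict.nodup_keys_insert d m.1 9999999 hnd) m.1,
          hcand, hsel, hcand']
        simp only [List.length_cons, List.getD_cons_succ, Nat.add_lt_add_iff_right]

      · have hcand : pvCand d = [] := by
          unfold pvCand
          rw [List.filter_eq_nil_iff]
          intro p hp
          simpa using fun hlt => hc ⟨p, hp, hlt⟩
        have hpick : (pvScanA d).2 = "" := by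
          rw [scanA_eq_items d hnd,
            scan_fixed d.items (9999999, "") (fun p hp => fun hlt => hc ⟨p, hp, hlt⟩)]
        have hstep : pvStepA (d, s) = (d.insert "" 9999999, "") := by
          rw [show pvStepA (d, s)
              = ((d.insert (pvScanA d).2 9999999), (pvScanA d).2) from rfl, hpick]
        have hcand' : pvCand (d.insert "" 9999999) = [] := by
          rw [cand_insert, hcand]; rfl
        rw [hstep, ih (d.insert "" 9999999) (PySem.Dict.nodup_keys_insert d "" 9999999 hnd) "",
          hcand', hcand]
        simp [PySem.List.sorted]

lemma foldl_const_iterate {α : Type} (f : α → α) :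
    ∀ (l : List Int) (s : α), l.foldl (fun s _ => f s) s = f^[l.length] s := by
  intro l
  induction l with
  | nil => intro s; rfl
  | cons x t ih =>
      intro s
      rw [List.foldl_cons, List.length_cons, Function.iterate_succ_apply]
      exact ih (f s)

lemma nodup_dictOf (dic : List (String × Int)) : (pvDictOf dic).keys.Nodup :=
  PySem.Dict.nodup_keys_foldl_insert_key dic Prod.fst (fun _ p => p.2)
    PySem.Dict.empty PySem.Dict.nodup_keys_empty

-- ===== VERDICT (by name: the statement is the Claim_ definition above) =====
theorem get_min_key_spec : Claim_equal_get_min_key := by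
  intro dic k _ hpre
  unfold Pre_get_min_key at hpre
  obtain ⟨n, rfl⟩ : ∃ n : Nat, k = (n : Int) + 1 := ⟨(k - 1).toNat, by omega⟩
  unfold Spec_get_min_key get_min_key
  simp only [get_min_key_alt]
  have hcast : ((n : Int) + 1) = ((n + 1 : Nat) : Int) := by push_cast; ring
  rw [hcast, PySem.List.pyRange_zero_natCast,
    foldl_const_iterate pvStepA _ (pvDictOf dic, ""), List.length_map, List.length_range,
    main_inv n (pvDictOf dic) (nodup_dictOf dic) ""]
  have hidx : ((n + 1 : Nat) : Int) - 1 = ((n : Nat) : Int) := by push_cast; ring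
  rw [hidx, PySem.List.pyGetD_natCast]
  have hSc : pvCand (pvDictOf dic)
      = (pvDictOf dic).items.filter (fun item => item.2 < 9999999) := rfl
  rw [hSc]
  set S := PySem.List.sorted ((pvDictOf dic).items.filter (fun item => item.2 < 9999999))
    (fun item => item.2) false with hS
  by_cases hlen : n < S.length
  · rw [if_pos hlen, if_pos ⟨by omega, by push_cast; omega⟩]
  · rw [if_neg hlen, if_neg (by push_cast; omega)]
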